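-- pv_equiv track=rewrite | github.com/harshit0605/Medagent | services/orchestrator/agent_workflow.py | _risk_triage
-- ===== SOURCE A (Python) =====
-- from typing import Any, Literal, TypedDict
--
-- Intent = Literal[
--     "adherence_update",
--     "refill_request",
--     "symptom_report",
--     "pregnancy_checklist",
--     "followup_update",
--     "general_question",
-- ]
--
-- RiskLevel = Literal["low", "medium", "high", "critical"]
--
-- def _risk_triage(intent: Intent, text: str) -> tuple[RiskLevel, bool, str | None]:
--     lower = text.lower()
--     if any(x in lower for x in ["unconscious", "cannot breathe", "severe bleeding", "chest pain"]):
--         return "critical", True, "critical_red_flag"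
--     if intent == "symptom_report" and any(x in lower for x in ["bleeding", "wheezing", "hypo", "very high bp", "breathless"]):
--         return "high", True, "high_risk_symptom_report"
--     if intent == "adherence_update" and any(x in lower for x in ["side effect", "confused"]):
--         return "medium", True, "adherence_safety_check"
--     return "low", False, None
-- ===== SOURCE B (Python) =====
-- # severity per keyword, with an optional intent gate; order irrelevant: we take the MAX level
-- _KEYWORD_SEVERITY = {
--     "unconscious": (3, None),
--     "cannot breathe": (3, None),
--     "severe bleeding": (3, None),
--     "chest pain": (3, None),
--     "bleeding": (2, "symptom_report"),
--     "wheezing": (2, "symptom_report"),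
--     "hypo": (2, "symptom_report"),
--     "very high bp": (2, "symptom_report"),
--     "breathless": (2, "symptom_report"),
--     "side effect": (1, "adherence_update"),
--     "confused": (1, "adherence_update"),
-- }
--
-- _RESULTS = {
--     3: ("critical", True, "critical_red_flag"),
--     2: ("high", True, "high_risk_symptom_report"),
--     1: ("medium", True, "adherence_safety_check"),
--     0: ("low", False, None),
-- }
--
-- def _risk_triage(intent, text):
--     lower = text.lower()
--     level = 0
--     for kw, (sev, req) in _KEYWORD_SEVERITY.items():
--         if (req is None or req == intent) and kw in lower and sev > level:
--             level = sev
--     return _RESULTS[level]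
-- ===== Notes on version B (the rewrite author's own statement) =====
-- stated objective: alternative
-- what changed: Instead of a first-match chain of tier checks with early returns, B makes one flat pass over a per-keyword severity map accumulating the maximum applicable severity level, then maps that level to the result tuple.
import Mathlib
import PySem

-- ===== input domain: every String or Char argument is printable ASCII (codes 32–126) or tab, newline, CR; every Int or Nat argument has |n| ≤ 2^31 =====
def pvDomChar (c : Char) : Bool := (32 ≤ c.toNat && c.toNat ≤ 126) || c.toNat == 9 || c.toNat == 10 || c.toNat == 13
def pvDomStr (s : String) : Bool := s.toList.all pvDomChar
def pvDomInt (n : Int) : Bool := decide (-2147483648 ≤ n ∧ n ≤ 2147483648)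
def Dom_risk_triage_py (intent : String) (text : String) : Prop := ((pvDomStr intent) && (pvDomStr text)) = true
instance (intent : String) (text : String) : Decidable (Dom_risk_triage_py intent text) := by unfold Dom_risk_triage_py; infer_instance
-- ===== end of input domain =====

-- B replaces A's first-match chain of tier checks by one flat max-severity pass over a per-keyword severity map, then a level lookup (alternative decomposition; same cost).


-- ===== PORT A =====
def risk_triage_py (intent : String) (text : String) : String × Bool × Option String :=
  let lower := PySem.Str.lower text
  if ["unconscious", "cannot breathe", "severe bleeding", "chest pain"].any
      (fun x => PySem.Str.isIn x lower) then
    ("critical", true, some "critical_red_flag")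
  else if intent == "symptom_report" &&
      ["bleeding", "wheezing", "hypo", "very high bp", "breathless"].any
        (fun x => PySem.Str.isIn x lower) then
    ("high", true, some "high_risk_symptom_report")
  else if intent == "adherence_update" &&
      ["side effect", "confused"].any (fun x => PySem.Str.isIn x lower) then
    ("medium", true, some "adherence_safety_check")
  else
    ("low", false, none)

-- ===== PORT B =====
-- keyword → (severity, optional intent gate), in Source B's dict insertion order
def pvKeywordSeverity : List (String × Int × Option String) :=
  [ ("unconscious", 3, none), ("cannot breathe", 3, none),
    ("severe bleeding", 3, none), ("chest pain", 3, none),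
    ("bleeding", 2, some "symptom_report"), ("wheezing", 2, some "symptom_report"),
    ("hypo", 2, some "symptom_report"), ("very high bp", 2, some "symptom_report"),
    ("breathless", 2, some "symptom_report"),
    ("side effect", 1, some "adherence_update"), ("confused", 1, some "adherence_update") ]

def pvResults : PySem.Dict Int (String × Bool × Option String) :=
  PySem.Dict.ofList
    [ (3, ("critical", true, some "critical_red_flag")),
      (2, ("high", true, some "high_risk_symptom_report")),
      (1, ("medium", true, some "adherence_safety_check")),
      (0, ("low", false, none)) ]

-- the loop body of Source B's single pass
def pvStep (intent lower : String) (lv : Int) (e : String × Int × Option String) : Int :=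
  if (match e.2.2 with | none => true | some r => r == intent)
      && PySem.Str.isIn e.1 lower && decide (e.2.1 > lv) then e.2.1 else lv

def risk_triage_py_alt (intent : String) (text : String) : String × Bool × Option String :=
  let lower := PySem.Str.lower text
  let level : Int := pvKeywordSeverity.foldl (pvStep intent lower) 0
  -- _RESULTS[level]: level ∈ {0,1,2,3} is always a present key, so getD's default is unreachable
  (pvResults.get? level).getD ("low", false, none)

-- ===== PRECONDITION & SPEC =====
def Spec_risk_triage_py (intent : String) (text : String) (out : String × Bool × Option String) : Prop := out = risk_triage_py_alt intent text
instance (intent : String) (text : String) (out : String × Bool × Option String) : Decidable (Spec_risk_triage_py intent text out) := by unfold Spec_risk_triage_py; infer_instance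

-- ===== CLAIM (what is proved, stated in full; the proofs are below) =====
def Claim_equal_risk_triage_py : Prop := ∀ (intent : String) (text : String), Dom_risk_triage_py intent text → Spec_risk_triage_py intent text (risk_triage_py intent text)

-- ===== LEMMAS AND PROOFS =====

-- once the level is at least every remaining severity, the fold keeps it
theorem pvStep_stay (intent lower : String) (lv : Int) (l : List (String × Int × Option String))
    (h : ∀ e ∈ l, e.2.1 ≤ lv) : l.foldl (pvStep intent lower) lv = lv := by
  induction l with
  | nil => rfl
  | cons e rest ih =>
    have he : e.2.1 ≤ lv := h e (List.mem_cons_self ..)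
    have hstep : pvStep intent lower lv e = lv := by
      unfold pvStep
      have : decide (e.2.1 > lv) = false := by simp; omega
      simp [this]
    simp only [List.foldl_cons, hstep]
    exact ih fun e' he' => h e' (List.mem_cons_of_mem _ he')

-- a uniform group (same severity s > 0, same gate g) folded from 0 yields s iff the gate
-- holds and some keyword of the group occurs
theorem pvStep_group (intent lower : String) (s : Int) (req : Option String) (g : Bool)
    (hgate : (match req with | none => true | some r => r == intent) = g)
    (l : List (String × Int × Option String)) (hs : 0 < s)
    (h : ∀ e ∈ l, e.2.1 = s ∧ e.2.2 = req) :
    l.foldl (pvStep intent lower) 0 =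
      if g && l.any (fun e => PySem.Str.isIn e.1 lower) then s else 0 := by
  induction l with
  | nil => simp
  | cons e rest ih =>
    obtain ⟨hes, her⟩ := h e (List.mem_cons_self ..)
    have hrest : ∀ e' ∈ rest, e'.2.1 = s ∧ e'.2.2 = req :=
      fun e' he' => h e' (List.mem_cons_of_mem _ he')
    have hgt : decide (s > (0:Int)) = true := by simp; omega
    have hstep : pvStep intent lower 0 e =
        if g && PySem.Str.isIn e.1 lower then s else 0 := by
      unfold pvStep
      rw [her, hgate, hes, hgt, Bool.and_true]
    by_cases hgp : (g && PySem.Str.isIn e.1 lower) = true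
    · obtain ⟨hgT, hpT⟩ := Bool.and_eq_true_iff.mp hgp
      have hstay : rest.foldl (pvStep intent lower) s = s :=
        pvStep_stay intent lower s rest (fun e' he' => le_of_eq (hrest e' he').1)
      rw [List.foldl_cons, hstep, if_pos hgp, hstay,
          if_pos (by simp only [List.any_cons, hgT, Bool.true_and]; rw [hpT, Bool.true_or])]
    · rw [List.foldl_cons, hstep, if_neg hgp, ih hrest]
      by_cases hgb : g = true
      · have hp : PySem.Str.isIn e.1 lower = false := by
          cases hp' : PySem.Str.isIn e.1 lower
          · rfl
          · exact absurd (by rw [hgb, Bool.true_and]; exact hp') hgp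
        simp only [List.any_cons, hgb, Bool.true_and]
        rw [hp, Bool.false_or]
      · have hg0 : g = false := Bool.eq_false_iff.mpr hgb
        simp [hg0]

theorem pvBeq_comm (a b : String) : (a == b) = (b == a) := by
  by_cases h : a = b
  · subst h; rfl
  · simp [h, Ne.symm h]

-- ===== VERDICT (by name: the statement is the Claim_ definition above) =====
theorem risk_triage_py_spec : Claim_equal_risk_triage_py := by
  intro intent text _
  unfold Spec_risk_triage_py risk_triage_py risk_triage_py_alt
  simp only []
  generalize PySem.Str.lower text = lower
  have hsplit : pvKeywordSeverity =
      [ (("unconscious":String), (3:Int), (none : Option String)), ("cannot breathe", 3, none),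
        ("severe bleeding", 3, none), ("chest pain", 3, none) ] ++
      ([ ("bleeding", 2, some "symptom_report"), ("wheezing", 2, some "symptom_report"),
         ("hypo", 2, some "symptom_report"), ("very high bp", 2, some "symptom_report"),
         ("breathless", 2, some "symptom_report") ] ++
       [ ("side effect", 1, some "adherence_update"), ("confused", 1, some "adherence_update") ]) := rfl
  rw [hsplit, List.foldl_append, List.foldl_append]
  rw [pvStep_group intent lower 3 none true rfl _ (by norm_num)
      (by intro e he; fin_cases he <;> exact ⟨rfl, rfl⟩)]
  have hcrit : ([ (("unconscious":String), (3:Int), (none : Option String)), ("cannot breathe", 3, none),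
      ("severe bleeding", 3, none), ("chest pain", 3, none) ].any (fun e => PySem.Str.isIn e.1 lower))
      = (["unconscious", "cannot breathe", "severe bleeding", "chest pain"].any
          (fun x => PySem.Str.isIn x lower)) := by
    simp [List.any_cons, List.any_nil]
  rw [hcrit, Bool.true_and]
  by_cases hc : (["unconscious", "cannot breathe", "severe bleeding", "chest pain"].any
      (fun x => PySem.Str.isIn x lower)) = true
  · rw [if_pos hc, if_pos hc,
        pvStep_stay intent lower 3 _ (by intro e he; fin_cases he <;> norm_num),
        pvStep_stay intent lower 3 _ (by intro e he; fin_cases he <;> norm_num)]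
    decide
  · rw [if_neg hc, if_neg hc]
    rw [pvStep_group intent lower 2 (some "symptom_report") ("symptom_report" == intent) rfl _
        (by norm_num) (by intro e he; fin_cases he <;> exact ⟨rfl, rfl⟩)]
    rw [pvBeq_comm "symptom_report" intent]
    have hhigh : ([ (("bleeding":String), (2:Int), (some "symptom_report" : Option String)),
        ("wheezing", 2, some "symptom_report"), ("hypo", 2, some "symptom_report"),
        ("very high bp", 2, some "symptom_report"), ("breathless", 2, some "symptom_report") ].any
          (fun e => PySem.Str.isIn e.1 lower))
        = (["bleeding", "wheezing", "hypo", "very high bp", "breathless"].any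
            (fun x => PySem.Str.isIn x lower)) := by
      simp [List.any_cons, List.any_nil]
    rw [hhigh]
    by_cases hh : (intent == "symptom_report" &&
        ["bleeding", "wheezing", "hypo", "very high bp", "breathless"].any
          (fun x => PySem.Str.isIn x lower)) = true
    · rw [if_pos hh, if_pos hh,
          pvStep_stay intent lower 2 _ (by intro e he; fin_cases he <;> norm_num)]
      decide
    · rw [if_neg hh, if_neg hh]
      rw [pvStep_group intent lower 1 (some "adherence_update") ("adherence_update" == intent) rfl _
          (by norm_num) (by intro e he; fin_cases he <;> exact ⟨rfl, rfl⟩)]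
      rw [pvBeq_comm "adherence_update" intent]
      have hmed : ([ (("side effect":String), (1:Int), (some "adherence_update" : Option String)),
          ("confused", 1, some "adherence_update") ].any (fun e => PySem.Str.isIn e.1 lower))
          = (["side effect", "confused"].any (fun x => PySem.Str.isIn x lower)) := by
        simp [List.any_cons, List.any_nil]
      rw [hmed]
      by_cases hm : (intent == "adherence_update" &&
          ["side effect", "confused"].any (fun x => PySem.Str.isIn x lower)) = true
      · rw [if_pos hm, if_pos hm]
        decide
      · rw [if_neg hm, if_neg hm]
        decide
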